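-- pv_equiv track=rewrite | github.com/FeelingXD/algorithm | programers/review/Jumpcase2.py | solution
-- ===== SOURCE A (Python) =====
-- def solution(n, k):
--     """
--     :param n: int
--     :param k: int
--     :return: int
--     """
--
--     MOD = 1_000_000_007
--
--     dp = [[]] * (n + 1)
--     for i in range(n + 1):
--         dp[i] = [0] * (k + 1)
--
--     dp[0][0] = 1
--     for i in range(1, n + 1):
--         for j in range(1, min(k + 1, i + 1)):
--             dp[i][j] = 0
--             for z in range(0, k + 1):
--                 if z != j:
--                     dp[i][j] += dp[i - j][z]
--                     dp[i][j] %= MOD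
--
--     result = 0
--     for i in range(k + 1):
--         result += dp[n][i]
--         result %= MOD
--
--     return result
-- ===== SOURCE B (Python) =====
-- def solution(n, k):
--     """
--     :param n: int
--     :param k: int
--     :return: int
--     """
--
--     MOD = 1_000_000_007
--
--     dp = [[0] * (k + 1) for _ in range(n + 1)]
--     dp[0][0] = 1
--     S = [0] * (n + 1)
--     S[0] = 1
--     for i in range(1, n + 1):
--         s = 0
--         for j in range(1, min(k, i) + 1):
--             v = (S[i - j] - dp[i - j][j]) % MOD
--             dp[i][j] = v
--             s = (s + v) % MOD
--         S[i] = s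
--     return S[n]
-- ===== Notes on version B (the rewrite author's own statement) =====
-- stated objective: faster
-- what changed: B replaces A's innermost loop over all k+1 previous-row entries by a maintained row-sum array: dp[i][j] = (S[i-j] - dp[i-j][j]) % MOD, turning O(n*k^2) into O(n*k); Pre_ excludes n < 0 or k < 0, where A (and B) raise IndexError.
import Mathlib
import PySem

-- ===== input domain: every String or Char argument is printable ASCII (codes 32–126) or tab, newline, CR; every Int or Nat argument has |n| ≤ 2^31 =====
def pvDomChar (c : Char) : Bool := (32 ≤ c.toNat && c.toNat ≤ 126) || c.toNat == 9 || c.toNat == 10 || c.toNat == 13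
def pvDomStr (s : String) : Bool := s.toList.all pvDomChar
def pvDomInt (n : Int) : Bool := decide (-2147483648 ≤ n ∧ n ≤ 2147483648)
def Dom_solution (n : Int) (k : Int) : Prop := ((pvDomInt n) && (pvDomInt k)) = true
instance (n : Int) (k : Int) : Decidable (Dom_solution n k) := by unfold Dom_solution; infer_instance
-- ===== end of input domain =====

-- B replaces A's innermost sum over the whole previous row by a maintained row-sum array (O(n*k) instead of O(n*k^2)); equal return value on Pre_ (n ≥ 0, k ≥ 0).

-- ===== PORT A =====
-- All indices are nonnegative and in range under Pre_ (0 ≤ n, 0 ≤ k), so `.toNat`/`getD` indexing is exact there.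
-- A's innermost z-loop: dp[i][j] accumulates dp[i-j][z] (z ≠ j) with `%= MOD` after each addition.
def solution_innerA (MOD : Int) (dp : List (List Int)) (i : Int) (j : Int) (k : Int) : Int :=
  (PySem.List.pyRange 0 (k + 1) 1).foldl
    (fun acc z => if z ≠ j then PySem.Int.mod (acc + ((dp.getD (i - j).toNat []).getD z.toNat 0)) MOD else acc) 0

-- A's body for one outer-loop index i: the j-loop mutating row i of dp.
def solution_stepA (MOD : Int) (k : Int) (dp : List (List Int)) (i : Int) : List (List Int) :=
  (PySem.List.pyRange 1 (min (k + 1) (i + 1)) 1).foldl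
    (fun dp j => dp.set i.toNat ((dp.getD i.toNat []).set j.toNat (solution_innerA MOD dp i j k))) dp

def solution (n : Int) (k : Int) : Int :=
  let MOD : Int := 1000000007
  -- dp = [[]] * (n+1); for i in range(n+1): dp[i] = [0]*(k+1)
  let dp : List (List Int) := (PySem.List.pyRange 0 (n + 1) 1).map (fun _ => List.replicate (k + 1).toNat 0)
  -- dp[0][0] = 1
  let dp := dp.set 0 ((dp.getD 0 []).set 0 1)
  let dp := (PySem.List.pyRange 1 (n + 1) 1).foldl (solution_stepA MOD k) dp
  -- result loop
  (PySem.List.pyRange 0 (k + 1) 1).foldl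
    (fun r i => PySem.Int.mod (r + ((dp.getD n.toNat []).getD i.toNat 0)) MOD) 0

-- ===== PORT B =====
-- B's body for one outer index i: build row i and its running sum s, then append row i and S[i].
def solution_stepB (MOD : Int) (k : Int) (st : List (List Int) × List Int) (i : Int) :
    List (List Int) × List Int :=
  let dp := st.1
  let S := st.2
  let rs := (PySem.List.pyRange 1 (min k i + 1) 1).foldl
    (fun p j =>
      let v := PySem.Int.mod ((S.getD (i - j).toNat 0) - ((dp.getD (i - j).toNat []).getD j.toNat 0)) MOD
      (p.1.set j.toNat v, PySem.Int.mod (p.2 + v) MOD))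
    (List.replicate (k + 1).toNat 0, 0)
  (dp ++ [rs.1], S ++ [rs.2])

def solution_alt (n : Int) (k : Int) : Int :=
  let MOD : Int := 1000000007
  let st := (PySem.List.pyRange 1 (n + 1) 1).foldl (solution_stepB MOD k)
      ([(List.replicate (k + 1).toNat 0).set 0 1], [1])
  st.2.getD n.toNat 0

-- ===== PRECONDITION & SPEC =====
-- Pre_ excludes n < 0 or k < 0: there Python A raises IndexError at `dp[0][0] = 1` (and Python B likewise).
def Pre_solution (n : Int) (k : Int) : Prop := 0 ≤ n ∧ 0 ≤ k
instance (n : Int) (k : Int) : Decidable (Pre_solution n k) := by unfold Pre_solution; infer_instance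
def pvWitness_solution : Int × Int := (4, 2)

def Spec_solution (n : Int) (k : Int) (out : Int) : Prop := out = solution_alt n k
instance (n : Int) (k : Int) (out : Int) : Decidable (Spec_solution n k out) := by unfold Spec_solution; infer_instance

-- ===== CLAIM (what is proved, stated in full; the proofs are below) =====
def Claim_equal_solution : Prop := ∀ (n : Int) (k : Int), Dom_solution n k → Pre_solution n k → Spec_solution n k (solution n k)

-- ===== LEMMAS AND PROOFS =====

-- Reference sequence: B's state after the first m outer iterations.
def rowsB (k : Int) : Nat → List (List Int) × List Int
  | 0 => ([(List.replicate (k + 1).toNat 0).set 0 1], [1])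
  | m + 1 => solution_stepB 1000000007 k (rowsB k m) ((m : Int) + 1)

-- (l.set p a).sum when p is in range
theorem sum_set_getD (l : List Int) (p : Nat) (a : Int) (hp : p < l.length) :
    (l.set p a).sum = l.sum - l.getD p 0 + a := by
  induction l generalizing p with
  | nil => simp at hp
  | cons x t ih =>
    cases p with
    | zero => simp [List.sum_cons]; ring
    | succ q =>
      simp only [List.set_cons_succ, List.sum_cons, List.getD_cons_succ]
      rw [ih q (by simpa using hp)]; ring

theorem modfold {β : Type} (M : Int) (g : β → Int) (l : List β) (a : Int) :
    l.foldl (fun acc x => (acc + g x) % M) (a % M) = (a + (l.map g).sum) % M := by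
  induction l generalizing a with
  | nil => simp
  | cons x t ih =>
    simp only [List.foldl_cons, List.map_cons, List.sum_cons]
    rw [Int.emod_add_emod, ih (a + g x)]; ring_nf

theorem modfold0 {β : Type} (M : Int) (g : β → Int) (l : List β) :
    l.foldl (fun acc x => (acc + g x) % M) 0 = (l.map g).sum % M := by
  have h0 : (0:Int) = 0 % M := by simp
  rw [h0, modfold]; simp

theorem map_getD_range_self (l : List Int) :
    (List.range l.length).map (fun t => l.getD t 0) = l := by
  apply List.ext_getElem
  · simp
  · intro i h1 h2
    simp [List.getD_eq_getElem?_getD, h2]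

-- sum over a nodup list with one element removed
theorem sum_map_filter_ne (g : Nat → Int) (jn : Nat) (L : List Nat) (hd : L.Nodup) (hm : jn ∈ L) :
    ((L.filter (fun t => decide (t ≠ jn))).map g).sum = (L.map g).sum - g jn := by
  induction L with
  | nil => simp at hm
  | cons x t ih =>
    rcases List.nodup_cons.mp hd with ⟨hx, ht⟩
    by_cases hxj : x = jn
    · subst hxj
      have hft : t.filter (fun t => decide (t ≠ x)) = t :=
        List.filter_eq_self.mpr (fun a ha => by simp; rintro rfl; exact hx ha)
      simp only [List.filter_cons, decide_not]
      rw [if_neg (by simp)]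
      simpa using congrArg (fun l => (l.map g).sum) hft
    · have hmt : jn ∈ t := by
        rcases List.mem_cons.mp hm with h | h
        · exact absurd h (fun h' => hxj h'.symm)
        · exact h
      simp only [List.filter_cons, List.map_cons, List.sum_cons]
      rw [if_pos (by simpa using hxj)]
      simp only [List.map_cons, List.sum_cons]
      rw [ih ht hmt]; ring

-- A's inner z-loop computes (row.sum - row[j]) % MOD
theorem zfold_eq (k : Int) (hk : 0 ≤ k) (row : List Int) (hlen : row.length = (k + 1).toNat)
    (j : Int) (hj1 : 1 ≤ j) (hjk : j ≤ k) (dp : List (List Int)) (i : Int)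
    (hrow : dp.getD (i - j).toNat [] = row) :
    solution_innerA 1000000007 dp i j k = (row.sum - row.getD j.toNat 0) % 1000000007 := by
  have hM : (0:Int) < 1000000007 := by norm_num
  have hk1 : k + 1 = (((k + 1).toNat : Nat) : Int) := by omega
  have hj : j = ((j.toNat : Nat) : Int) := by omega
  unfold solution_innerA
  rw [hrow, hk1, hj, PySem.List.pyRange_zero_natCast, List.foldl_map]
  simp only [PySem.Int.mod_eq_emod_of_pos hM, ne_eq, Nat.cast_inj, Int.toNat_natCast]
  rw [PySem.List.foldl_ite_eq_foldl_filter (p := fun t => ¬ t = j.toNat)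
        (f := fun acc t => (acc + row.getD t 0) % 1000000007)]
  rw [modfold0]
  have hmem : j.toNat ∈ List.range (k + 1).toNat := by
    rw [List.mem_range]; omega
  have := sum_map_filter_ne (fun t => row.getD t 0) j.toNat (List.range (k + 1).toNat)
      (List.nodup_range) hmem
  simp only [ne_eq] at this
  rw [this]
  have hrowsum : ((List.range (k + 1).toNat).map (fun t => row.getD t 0)).sum = row.sum := by
    rw [← hlen, map_getD_range_self]
  rw [hrowsum]

theorem getD_append_length {α : Type} (l1 l2 : List α) (x d : α) :
    (l1 ++ x :: l2).getD l1.length d = x := by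
  simp [List.getD_eq_getElem?_getD]

theorem set_append_length {α : Type} (l1 l2 : List α) (x y : α) :
    (l1 ++ x :: l2).set l1.length y = l1 ++ y :: l2 := by
  rw [List.set_append_right _ _ (le_refl _)]; simp

theorem getD_concat {α : Type} (l1 : List α) (x d : α) (t : Nat) (h : t = l1.length) :
    (l1 ++ [x]).getD t d = x := by
  subst h; exact getD_append_length l1 [] x d

theorem sub_emod_left (a b M : Int) : (a % M - b) % M = (a - b) % M := by
  conv_rhs => rw [Int.sub_emod]
  conv_lhs => rw [Int.sub_emod]
  rw [Int.emod_emod_of_dvd _ dvd_rfl]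

-- joint inner loop: A's j-loop on row i mirrors B's row construction
theorem inner_AB (k : Int) (hk : 0 ≤ k)
    (front back : List (List Int)) (S : List Int)
    (i : Int) (hi : i = (front.length : Int))
    (hprops : ∀ t : Nat, t < front.length →
      (front.getD t []).length = (k + 1).toNat ∧ S.getD t 0 = (front.getD t []).sum % 1000000007)
    (c : Nat) (hc : (c : Int) ≤ min k i) (r : List Int) (s : Int) :
    (PySem.List.pyRange 1 ((c : Int) + 1) 1).foldl
        (fun dp j => dp.set i.toNat ((dp.getD i.toNat []).set j.toNat (solution_innerA 1000000007 dp i j k)))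
        (front ++ r :: back)
      = front ++ ((PySem.List.pyRange 1 ((c : Int) + 1) 1).foldl
          (fun p j =>
            let v := PySem.Int.mod ((S.getD (i - j).toNat 0) - ((front.getD (i - j).toNat []).getD j.toNat 0)) 1000000007
            (p.1.set j.toNat v, PySem.Int.mod (p.2 + v) 1000000007))
          (r, s)).1 :: back := by
  have hM : (0:Int) < 1000000007 := by norm_num
  induction c with
  | zero => rfl
  | succ c ih =>
    have hcast : ((c + 1 : Nat) : Int) = (c : Int) + 1 := by push_cast; ring
    have hck : (c : Int) + 1 ≤ k := by rw [hcast] at hc; exact le_trans hc (min_le_left _ _)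
    have hci : (c : Int) + 1 ≤ i := by rw [hcast] at hc; exact le_trans hc (min_le_right _ _)
    have hc' : ((c : Nat) : Int) ≤ min k i := le_min (by omega) (by omega)
    have h1 : ((c + 1 : Nat) : Int) + 1 = (((c : Nat) : Int) + 1) + 1 := by push_cast; ring
    rw [h1, PySem.List.pyRange_one_succ_right (by omega : (1:Int) ≤ (c : Int) + 1),
        List.foldl_append, List.foldl_append, ih hc']
    set resB := (PySem.List.pyRange 1 ((c : Int) + 1) 1).foldl
      (fun p j =>
        let v := PySem.Int.mod ((S.getD (i - j).toNat 0) - ((front.getD (i - j).toNat []).getD j.toNat 0)) 1000000007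
        (p.1.set j.toNat v, PySem.Int.mod (p.2 + v) 1000000007)) (r, s) with hresB
    simp only [List.foldl_cons, List.foldl_nil]
    have hiN : i.toNat = front.length := by omega
    have hjt : ((c : Int) + 1).toNat = c + 1 := by omega
    have htdef : (i - ((c : Int) + 1)).toNat = front.length - (c + 1) := by omega
    have htlt : front.length - (c + 1) < front.length := by omega
    obtain ⟨hrlen, hSrel⟩ := hprops (front.length - (c + 1)) htlt
    have hdpget : (front ++ resB.1 :: back).getD (front.length - (c + 1)) [] =
        front.getD (front.length - (c + 1)) [] := List.getD_append _ _ _ _ htlt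
    have hvA := zfold_eq k hk (front.getD (front.length - (c + 1)) []) hrlen
      ((c : Int) + 1) (by omega) hck (front ++ resB.1 :: back) i (by rw [htdef]; exact hdpget)
    rw [hiN, getD_append_length, hvA, set_append_length]
    simp only [PySem.Int.mod_eq_emod_of_pos hM, htdef, hSrel, hjt, sub_emod_left]

-- properties of B's inner fold: length, running sum, untouched positions
theorem innerB_props (M : Int) (hM : 0 < M) (v : Int → Int) (r0 : List Int) (s0 : Int)
    (hs0 : s0 = PySem.Int.mod r0.sum M) (c : Nat) (hc : c < r0.length)
    (h0 : ∀ t : Nat, 1 ≤ t → r0.getD t 0 = 0) :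
    ((PySem.List.pyRange 1 ((c : Int) + 1) 1).foldl
        (fun p j => ((p.1.set j.toNat (v j)), PySem.Int.mod (p.2 + v j) M)) (r0, s0)).1.length = r0.length ∧
    ((PySem.List.pyRange 1 ((c : Int) + 1) 1).foldl
        (fun p j => ((p.1.set j.toNat (v j)), PySem.Int.mod (p.2 + v j) M)) (r0, s0)).2
      = PySem.Int.mod ((PySem.List.pyRange 1 ((c : Int) + 1) 1).foldl
        (fun p j => ((p.1.set j.toNat (v j)), PySem.Int.mod (p.2 + v j) M)) (r0, s0)).1.sum M ∧
    (∀ t : Nat, c < t →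
      ((PySem.List.pyRange 1 ((c : Int) + 1) 1).foldl
        (fun p j => ((p.1.set j.toNat (v j)), PySem.Int.mod (p.2 + v j) M)) (r0, s0)).1.getD t 0 = r0.getD t 0) := by
  induction c with
  | zero => exact ⟨rfl, hs0, fun t ht => rfl⟩
  | succ c ih =>
    have h1 : ((c + 1 : Nat) : Int) + 1 = (((c : Nat) : Int) + 1) + 1 := by push_cast; ring
    rw [h1, PySem.List.pyRange_one_succ_right (by omega), List.foldl_append]
    obtain ⟨ihl, ihs, ihu⟩ := ih (by omega)
    set res := (PySem.List.pyRange 1 ((c : Int) + 1) 1).foldl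
      (fun p j => ((p.1.set j.toNat (v j)), PySem.Int.mod (p.2 + v j) M)) (r0, s0) with hres
    simp only [List.foldl_cons, List.foldl_nil]
    have htn : ((c : Int) + 1).toNat = c + 1 := by omega
    refine ⟨by simp [htn, ihl], ?_, ?_⟩
    · simp only [htn]
      simp only [PySem.Int.mod_eq_emod_of_pos hM] at ihs ⊢
      rw [ihs, Int.emod_add_emod, sum_set_getD _ _ _ (by rw [ihl]; exact hc)]
      rw [ihu (c + 1) (by omega), h0 (c + 1) (by omega)]
      ring_nf
    · intro t ht
      simp only [htn]
      have hne : c + 1 ≠ t := by omega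
      rw [List.getD_eq_getElem?_getD, List.getElem?_set_ne hne, ← List.getD_eq_getElem?_getD]
      exact ihu t (by omega)

theorem propsB (k : Int) (hk : 0 ≤ k) (m : Nat) :
    (rowsB k m).1.length = m + 1 ∧ (rowsB k m).2.length = m + 1 ∧
    (∀ t : Nat, t ≤ m →
      ((rowsB k m).1.getD t []).length = (k + 1).toNat ∧
      (rowsB k m).2.getD t 0 = ((rowsB k m).1.getD t []).sum % 1000000007) := by
  have hM : (0:Int) < 1000000007 := by norm_num
  induction m with
  | zero =>
    refine ⟨rfl, rfl, ?_⟩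
    intro t ht
    have ht0 : t = 0 := by omega
    subst ht0
    have hK : 0 < (List.replicate (k + 1).toNat (0:Int)).length := by simp; omega
    refine ⟨show ((List.replicate (k + 1).toNat (0:Int)).set 0 1).length = (k + 1).toNat by simp, ?_⟩
    show (1:Int) = ((List.replicate (k + 1).toNat (0:Int)).set 0 1).sum % 1000000007
    rw [sum_set_getD _ 0 1 hK]
    simp
  | succ m ih =>
    obtain ⟨ih1, ih2, ih3⟩ := ih
    have hmin0 : (0:Int) ≤ min k ((m:Int) + 1) := by omega
    have hminc : min k ((m:Int) + 1) = (((min k ((m:Int) + 1)).toNat : Nat) : Int) := by omega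
    have hclt : (min k ((m:Int) + 1)).toNat < (List.replicate (k + 1).toNat (0:Int)).length := by
      simp; omega
    have hrep0 : ∀ t : Nat, 1 ≤ t → (List.replicate (k + 1).toNat (0:Int)).getD t 0 = 0 := by
      intro t _
      simp [List.getD_eq_getElem?_getD, List.getElem?_replicate]
      split <;> simp
    have hs0 : (0:Int) = PySem.Int.mod (List.replicate (k + 1).toNat (0:Int)).sum 1000000007 := by
      simp
    have H := innerB_props 1000000007 hM
      (fun j => PySem.Int.mod (((rowsB k m).2.getD (((m:Int) + 1) - j).toNat 0) -
        (((rowsB k m).1.getD (((m:Int) + 1) - j).toNat []).getD j.toNat 0)) 1000000007)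
      (List.replicate (k + 1).toNat 0) 0 hs0 ((min k ((m:Int) + 1)).toNat) hclt hrep0
    simp only [] at H
    have hrw : rowsB k (m + 1) =
        ((rowsB k m).1 ++ [((PySem.List.pyRange 1 ((((min k ((m:Int) + 1)).toNat : Nat) : Int) + 1) 1).foldl
          (fun p j =>
            (p.1.set j.toNat (PySem.Int.mod (((rowsB k m).2.getD (((m:Int) + 1) - j).toNat 0) -
              (((rowsB k m).1.getD (((m:Int) + 1) - j).toNat []).getD j.toNat 0)) 1000000007),
             PySem.Int.mod (p.2 + PySem.Int.mod (((rowsB k m).2.getD (((m:Int) + 1) - j).toNat 0) -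
              (((rowsB k m).1.getD (((m:Int) + 1) - j).toNat []).getD j.toNat 0)) 1000000007) 1000000007))
          (List.replicate (k + 1).toNat 0, 0)).1],
         (rowsB k m).2 ++ [((PySem.List.pyRange 1 ((((min k ((m:Int) + 1)).toNat : Nat) : Int) + 1) 1).foldl
          (fun p j =>
            (p.1.set j.toNat (PySem.Int.mod (((rowsB k m).2.getD (((m:Int) + 1) - j).toNat 0) -
              (((rowsB k m).1.getD (((m:Int) + 1) - j).toNat []).getD j.toNat 0)) 1000000007),
             PySem.Int.mod (p.2 + PySem.Int.mod (((rowsB k m).2.getD (((m:Int) + 1) - j).toNat 0) -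
              (((rowsB k m).1.getD (((m:Int) + 1) - j).toNat []).getD j.toNat 0)) 1000000007) 1000000007))
          (List.replicate (k + 1).toNat 0, 0)).2]) := by
      show solution_stepB 1000000007 k (rowsB k m) ((m:Int) + 1) = _
      unfold solution_stepB
      rw [← hminc]
    rw [hrw]
    obtain ⟨H1, H2, _⟩ := H
    refine ⟨by simp [ih1], by simp [ih2], ?_⟩
    intro t ht
    by_cases htm : t ≤ m
    · rw [List.getD_append _ _ _ _ (by omega : t < (rowsB k m).1.length),
          List.getD_append _ _ _ _ (by omega : t < (rowsB k m).2.length)]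
      exact ih3 t htm
    · have ht1 : t = m + 1 := by omega
      rw [getD_concat _ _ _ _ (by omega), getD_concat _ _ _ _ (by omega)]
      exact ⟨by rw [H1]; simp, by rw [H2, PySem.Int.mod_eq_emod_of_pos hM]⟩

theorem outerB (k : Int) (NN : Nat) :
    (PySem.List.pyRange 1 ((NN : Int) + 1) 1).foldl (solution_stepB 1000000007 k)
      ([(List.replicate (k + 1).toNat 0).set 0 1], [1]) = rowsB k NN := by
  induction NN with
  | zero => rfl
  | succ m ih =>
    have h1 : ((m + 1 : Nat) : Int) + 1 = (((m : Nat) : Int) + 1) + 1 := by push_cast; ring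
    rw [h1, PySem.List.pyRange_one_succ_right (by omega : (1:Int) ≤ (m : Int) + 1),
        List.foldl_append, ih]
    rfl

theorem dpInit_eq (k : Int) (NN : Nat) :
    (((PySem.List.pyRange 0 (((NN : Int)) + 1) 1).map (fun _ => List.replicate (k + 1).toNat 0)).set 0
        ((((PySem.List.pyRange 0 (((NN : Int)) + 1) 1).map (fun _ => List.replicate (k + 1).toNat 0)).getD 0 []).set 0 1))
      = ((List.replicate (k + 1).toNat (0:Int)).set 0 1) :: List.replicate NN (List.replicate (k + 1).toNat 0) := by
  have h1 : ((NN : Int)) + 1 = (((NN + 1 : Nat) : Nat) : Int) := by push_cast; ring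
  rw [h1, PySem.List.pyRange_zero_natCast]
  have h2 : (List.range (NN + 1)).map (fun (_ : Nat) => List.replicate (k + 1).toNat (0:Int)) =
      List.replicate (NN + 1) (List.replicate (k + 1).toNat (0:Int)) := by simp
  rw [List.map_map]
  simp only [Function.comp_def]
  rw [h2, List.replicate_succ]
  rfl

theorem outerA (k : Int) (hk : 0 ≤ k) (NN : Nat) (m : Nat) (hm : m ≤ NN) :
    (PySem.List.pyRange 1 ((m : Int) + 1) 1).foldl (solution_stepA 1000000007 k)
      ((((List.replicate (k + 1).toNat (0:Int)).set 0 1)) :: List.replicate NN (List.replicate (k + 1).toNat 0))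
      = (rowsB k m).1 ++ List.replicate (NN - m) (List.replicate (k + 1).toNat 0) := by
  induction m with
  | zero => simp [rowsB]
  | succ m ih =>
    have hm' : m ≤ NN := by omega
    have h1 : ((m + 1 : Nat) : Int) + 1 = (((m : Nat) : Int) + 1) + 1 := by push_cast; ring
    rw [h1, PySem.List.pyRange_one_succ_right (by omega : (1:Int) ≤ (m : Int) + 1),
        List.foldl_append, ih hm']
    simp only [List.foldl_cons, List.foldl_nil]
    obtain ⟨p1, p2, p3⟩ := propsB k hk m
    -- rewrite the replicate tail as zrow :: replicate (NN - (m+1)) zrow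
    have hrep : List.replicate (NN - m) (List.replicate (k + 1).toNat (0:Int)) =
        (List.replicate (k + 1).toNat (0:Int)) :: List.replicate (NN - (m + 1)) (List.replicate (k + 1).toNat 0) := by
      rw [show NN - m = (NN - (m + 1)) + 1 by omega, List.replicate_succ]
    rw [hrep]
    have hmin0 : (0:Int) ≤ min k ((m:Int) + 1) := by omega
    have hminc : min k ((m:Int) + 1) = (((min k ((m:Int) + 1)).toNat : Nat) : Int) := by omega
    have hstep : solution_stepA 1000000007 k
        ((rowsB k m).1 ++ (List.replicate (k + 1).toNat (0:Int)) ::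
          List.replicate (NN - (m + 1)) (List.replicate (k + 1).toNat 0)) ((m:Int) + 1)
        = (rowsB k m).1 ++
          ((PySem.List.pyRange 1 ((((min k ((m:Int) + 1)).toNat : Nat) : Int) + 1) 1).foldl
            (fun p j =>
              let v := PySem.Int.mod (((rowsB k m).2.getD (((m:Int) + 1) - j).toNat 0) -
                (((rowsB k m).1.getD (((m:Int) + 1) - j).toNat []).getD j.toNat 0)) 1000000007
              (p.1.set j.toNat v, PySem.Int.mod (p.2 + v) 1000000007))
            (List.replicate (k + 1).toNat 0, 0)).1 ::
          List.replicate (NN - (m + 1)) (List.replicate (k + 1).toNat 0) := by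
      unfold solution_stepA
      have hminA : min (k + 1) (((m:Int) + 1) + 1) = (((min k ((m:Int) + 1)).toNat : Nat) : Int) + 1 := by omega
      rw [hminA]
      exact inner_AB k hk (rowsB k m).1
        (List.replicate (NN - (m + 1)) (List.replicate (k + 1).toNat 0)) (rowsB k m).2
        ((m:Int) + 1) (by rw [p1]; push_cast; ring)
        (fun t ht => p3 t (by omega))
        ((min k ((m:Int) + 1)).toNat) (by omega)
        (List.replicate (k + 1).toNat 0) 0
    rw [hstep]
    show _ = (solution_stepB 1000000007 k (rowsB k m) ((m:Int) + 1)).1 ++ _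
    unfold solution_stepB
    rw [← hminc]
    simp [List.append_assoc]

-- ===== VERDICT (by name: the statement is the Claim_ definition above) =====
theorem solution_spec : Claim_equal_solution := by
  unfold Claim_equal_solution
  intro n k _ hpre
  obtain ⟨hn0, hk0⟩ := hpre
  unfold Spec_solution
  have hM : (0:Int) < 1000000007 := by norm_num
  have hn : n = ((n.toNat : Nat) : Int) := by omega
  rw [hn]
  unfold solution solution_alt
  simp only []
  rw [dpInit_eq k n.toNat, outerA k hk0 n.toNat n.toNat (le_refl _), outerB k n.toNat]
  obtain ⟨p1, p2, p3⟩ := propsB k hk0 n.toNat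
  obtain ⟨hlen, hsum⟩ := p3 n.toNat (le_refl _)
  simp only [Nat.sub_self, List.replicate_zero, List.append_nil, Int.toNat_natCast]
  have hk1 : k + 1 = (((k + 1).toNat : Nat) : Int) := by omega
  rw [hk1, PySem.List.pyRange_zero_natCast, List.foldl_map]
  simp only [PySem.Int.mod_eq_emod_of_pos hM, Int.toNat_natCast]
  rw [modfold0]
  rw [← hlen, map_getD_range_self]
  exact hsum.symm
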